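-- pv_equiv track=rewrite | github.com/HSJ02/ppphomework | codework16/study_api.py | sumifs
-- ===== SOURCE A (Python) =====
-- def sumifs(rainfalls, months, selected):
--     total = 0
--     for i in range(len(rainfalls)):
--         rain = rainfalls[i]
--         month = months[i]
--         if month in selected:
--             total += rain
--     return total
-- ===== SOURCE B (Python) =====
-- def sumifs(rainfalls, months, selected):
--     # One pass: bucket rainfall totals per month, then sum the distinct selected months.
--     totals = {}
--     for rain, month in zip(rainfalls, months):
--         totals[month] = totals.get(month, 0) + rain
--     return sum(totals.get(m, 0) for m in set(selected))
-- ===== Notes on version B (the rewrite author's own statement) =====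
-- stated objective: faster
-- what changed: Replaces the index loop with an inner membership scan of selected by a single zip pass building a per-month total dict, then a second pass over the distinct selected months reading the buckets.
import Mathlib
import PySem

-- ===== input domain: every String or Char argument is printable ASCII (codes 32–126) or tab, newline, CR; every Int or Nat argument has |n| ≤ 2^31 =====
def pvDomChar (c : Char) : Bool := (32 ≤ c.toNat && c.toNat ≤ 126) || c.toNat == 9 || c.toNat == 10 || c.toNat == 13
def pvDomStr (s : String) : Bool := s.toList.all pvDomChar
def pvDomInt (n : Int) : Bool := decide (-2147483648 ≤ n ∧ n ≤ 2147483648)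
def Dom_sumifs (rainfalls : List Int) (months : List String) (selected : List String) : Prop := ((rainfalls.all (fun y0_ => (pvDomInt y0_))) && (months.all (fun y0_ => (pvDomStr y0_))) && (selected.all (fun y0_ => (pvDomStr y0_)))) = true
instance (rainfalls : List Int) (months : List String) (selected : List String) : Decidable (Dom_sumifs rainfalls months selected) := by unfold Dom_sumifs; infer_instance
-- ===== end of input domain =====

-- B replaces A's index loop with an inner membership scan of selected (O(n*k)) by one zip pass
-- building a per-month total dict and a pass over the distinct selected months (O(n+k), measured faster).

-- ===== PORT A =====
-- total = 0; for i in range(len(rainfalls)): rain = rainfalls[i]; month = months[i];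
-- if month in selected: total += rain.  The indexing is made total with pyGetD; Pre_ below
-- admits exactly the inputs on which Python's months[i] cannot raise IndexError.
def sumifs (rainfalls : List Int) (months : List String) (selected : List String) : Int :=
  (PySem.List.pyRange 0 rainfalls.length 1).foldl
    (fun total i =>
      let rain := PySem.List.pyGetD rainfalls i 0
      let month := PySem.List.pyGetD months i ""
      if selected.contains month then total + rain else total) 0

-- ===== PORT B =====
def sumifs_alt (rainfalls : List Int) (months : List String) (selected : List String) : Int :=
  let totals := (rainfalls.zip months).foldl
    (fun d p => d.insert p.2 (d.getD p.2 0 + p.1)) PySem.Dict.empty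
  ((PySem.Set.ofList selected).map (fun m => totals.getD m 0)).sum

-- ===== PRECONDITION & SPEC =====
-- A raises IndexError on months[i] when months is shorter than rainfalls; exactly those inputs are excluded.
def Pre_sumifs (rainfalls : List Int) (months : List String) (selected : List String) : Prop :=
  rainfalls.length ≤ months.length
instance (rainfalls : List Int) (months : List String) (selected : List String) : Decidable (Pre_sumifs rainfalls months selected) := by unfold Pre_sumifs; infer_instance
def pvWitness_sumifs : List Int × List String × List String := ([3, -4, 5], ["Jan", "Feb", "Jan"], ["Jan", "Mar"])

def Spec_sumifs (rainfalls : List Int) (months : List String) (selected : List String) (out : Int) : Prop := out = sumifs_alt rainfalls months selected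
instance (rainfalls : List Int) (months : List String) (selected : List String) (out : Int) : Decidable (Spec_sumifs rainfalls months selected out) := by unfold Spec_sumifs; infer_instance

-- ===== CLAIM (what is proved, stated in full; the proofs are below) =====
def Claim_equal_sumifs : Prop := ∀ (rainfalls : List Int) (months : List String) (selected : List String), Dom_sumifs rainfalls months selected → Pre_sumifs rainfalls months selected → Spec_sumifs rainfalls months selected (sumifs rainfalls months selected)

-- ===== LEMMAS AND PROOFS =====

-- The bucket built by B's first pass holds, for each month, the sum of its paired rainfalls.
theorem getD_hist (L : List (Int × String)) (d : PySem.Dict String Int) (mo : String) :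
    (L.foldl (fun d p => d.insert p.2 (d.getD p.2 0 + p.1)) d).getD mo 0
      = d.getD mo 0 + ((L.filter (fun p => p.2 == mo)).map (·.1)).sum := by
  induction L generalizing d with
  | nil => simp
  | cons p L ih =>
    simp only [List.foldl_cons, List.filter_cons]
    rw [ih, PySem.Dict.getD_insert]
    by_cases h : mo = p.2
    · simp [h]; ring
    · simp [h, Ne.symm h]

-- Summing an indicator over a duplicate-free list.
theorem sum_indicator (S : List String) (hS : S.Nodup) (k : String) (v : Int) :
    (S.map (fun mo => if k = mo then v else 0)).sum = if k ∈ S then v else 0 := by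
  induction S with
  | nil => simp
  | cons x S ih =>
    rcases List.nodup_cons.mp hS with ⟨hx, hS'⟩
    simp only [List.map_cons, List.sum_cons, List.mem_cons, ih hS']
    by_cases h : k = x
    · subst h; simp [hx]
    · simp [h]

-- A's conditional accumulation over pairs equals the sum, over any duplicate-free
-- enumeration S of the selected months, of the per-month bucket totals.
theorem fold_pairs_eq_setSum (L : List (Int × String)) (S selected : List String)
    (hS : S.Nodup) (hmem : ∀ x, x ∈ S ↔ selected.contains x) (t : Int) :
    L.foldl (fun total p => if selected.contains p.2 then total + p.1 else total) t
      = t + (S.map (fun mo => ((L.filter (fun p => p.2 == mo)).map (·.1)).sum)).sum := by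
  induction L generalizing t with
  | nil => simp
  | cons p L ih =>
    simp only [List.foldl_cons]
    rw [ih]
    have hsplit : (S.map (fun mo => (((p :: L).filter (fun q => q.2 == mo)).map (·.1)).sum)).sum
        = (S.map (fun mo => if p.2 = mo then p.1 else 0)).sum
          + (S.map (fun mo => ((L.filter (fun q => q.2 == mo)).map (·.1)).sum)).sum := by
      rw [← List.sum_map_add]
      congr 1
      apply List.map_congr_left
      intro mo _
      by_cases h : p.2 = mo <;> simp [h]
    rw [hsplit, sum_indicator S hS p.2 p.1]
    by_cases h : selected.contains p.2
    · have : p.2 ∈ S := (hmem p.2).mpr h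
      simp only [h, if_true, this]
      ring
    · have : p.2 ∉ S := fun hc => h ((hmem p.2).mp hc)
      rw [if_neg h, if_neg this]
      ring

-- A's index loop, under Pre_, is the conditional accumulation over the zipped pairs.
theorem sumifs_eq_fold_zip (rainfalls : List Int) (months : List String)
    (selected : List String) (h : rainfalls.length ≤ months.length) (t : Int) :
    (PySem.List.pyRange 0 rainfalls.length 1).foldl
      (fun total i =>
        if selected.contains (PySem.List.pyGetD months i "")
        then total + PySem.List.pyGetD rainfalls i 0 else total) t
      = (rainfalls.zip months).foldl
          (fun total p => if selected.contains p.2 then total + p.1 else total) t := by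
  induction rainfalls generalizing months t with
  | nil => simp [PySem.List.pyRange]
  | cons r rs ih =>
    cases months with
    | nil => simp at h
    | cons m ms =>
      have h' : rs.length ≤ ms.length := by simpa using h
      rw [PySem.List.pyRange_one_cons (by simp)]
      simp only [List.foldl_cons, List.zip_cons_cons,
        PySem.List.pyGetD_zero_cons]
      have hmap : PySem.List.pyRange (0 + 1) ((r :: rs).length : Int) 1
          = (PySem.List.pyRange 0 rs.length 1).map (fun i => i + 1) := by
        apply List.ext_getElem
        · simp [PySem.List.length_pyRange_one]
        · intro k hk₁ hk₂
          simp only [List.getElem_map]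
          rw [PySem.List.getElem_pyRange_one, PySem.List.getElem_pyRange_one]
          ring
      rw [hmap, List.foldl_map]
      have hcong := PySem.List.foldl_congr_mem (PySem.List.pyRange 0 (rs.length : Int) 1)
        (fun total i =>
          if selected.contains (PySem.List.pyGetD (m :: ms) (i + 1) "")
          then total + PySem.List.pyGetD (r :: rs) (i + 1) 0 else total)
        (fun total i =>
          if selected.contains (PySem.List.pyGetD ms i "")
          then total + PySem.List.pyGetD rs i 0 else total)
        (if selected.contains m then t + r else t) ?_
      · exact hcong.trans (ih ms h' _)
      · intro acc x hx
        rcases PySem.List.mem_pyRange_one.mp hx with ⟨hx0, _⟩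
        obtain ⟨k, rfl⟩ : ∃ k : Nat, x = (k : Int) := ⟨x.toNat, (Int.toNat_of_nonneg hx0).symm⟩
        have hc : ((k : Int) + 1) = ((k + 1 : Nat) : Int) := by push_cast; ring
        simp only [hc, PySem.List.pyGetD_natCast]
        simp

-- ===== VERDICT (by name: the statement is the Claim_ definition above) =====
theorem sumifs_spec : Claim_equal_sumifs := by
  intro rainfalls months selected _ hpre
  unfold Spec_sumifs sumifs sumifs_alt
  rw [sumifs_eq_fold_zip rainfalls months selected hpre 0,
    fold_pairs_eq_setSum (rainfalls.zip months) (PySem.Set.ofList selected) selected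
      (PySem.Set.nodup_ofList selected)
      (fun x => by rw [PySem.Set.mem_ofList]; simp) 0]
  simp only [zero_add]
  congr 1
  apply List.map_congr_left
  intro mo _
  rw [getD_hist]
  simp
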